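-- pv_equiv track=rewrite | github.com/MonicaBebesita/prueba-de-algoritmia | buscador_numeros.py | encontrar_limites_para_consultas
-- ===== SOURCE A (Python) =====
-- import bisect
--
-- def encontrar_limites_para_consultas(db, consultas):
--     """
--     Encuentra los límites superior e inferior para una lista de consultas
--     en una base de datos de números.
--
--     Args:
--         db (list): La lista de números enteros ordenada (base de datos).
--         consultas (list): La lista de números a consultar.
--
--     Returns:
--         str: Una cadena de texto con los resultados, cada uno en una nueva línea.
--     """
--     resultados = []
--
--     db_unica = sorted(list(set(db)))
--
--     if not db_unica:
--         #Si la base de datos está vacía, todas las respuestas son 'X X'.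
--         return '\n'.join(['X X'] * len(consultas))
--
--     for q in consultas:
--         limite_inferior = 'X'
--         limite_superior = 'X'
--
--         #Encontrar el límite superior
--         idx_superior = bisect.bisect_right(db_unica, q)
--
--         if idx_superior < len(db_unica):
--             limite_superior = db_unica[idx_superior]
--
--         #Encontrar el límite inferior
--         idx_inferior_candidato = bisect.bisect_left(db_unica, q)
--
--         if idx_inferior_candidato > 0:
--             limite_inferior = db_unica[idx_inferior_candidato - 1]
--
--         resultados.append(f"{limite_inferior} {limite_superior}")
--
--     return "\n".join(resultados)
-- ===== SOURCE B (Python) =====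
-- def encontrar_limites_para_consultas(db, consultas):
--     lineas = []
--     for q in consultas:
--         inf = None
--         sup = None
--         for x in db:
--             if x < q and (inf is None or x > inf):
--                 inf = x
--             if x > q and (sup is None or x < sup):
--                 sup = x
--         lineas.append(f"{inf if inf is not None else 'X'} {sup if sup is not None else 'X'}")
--     return "\n".join(lineas)
-- ===== Notes on version B (the rewrite author's own statement) =====
-- stated objective: alternative
-- what changed: B drops the sort/dedup/bisect machinery entirely: for each query it computes the strict predecessor (running max of elements < q) and strict successor (running min of elements > q) in one direct scan of the raw db.
import Mathlib
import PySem

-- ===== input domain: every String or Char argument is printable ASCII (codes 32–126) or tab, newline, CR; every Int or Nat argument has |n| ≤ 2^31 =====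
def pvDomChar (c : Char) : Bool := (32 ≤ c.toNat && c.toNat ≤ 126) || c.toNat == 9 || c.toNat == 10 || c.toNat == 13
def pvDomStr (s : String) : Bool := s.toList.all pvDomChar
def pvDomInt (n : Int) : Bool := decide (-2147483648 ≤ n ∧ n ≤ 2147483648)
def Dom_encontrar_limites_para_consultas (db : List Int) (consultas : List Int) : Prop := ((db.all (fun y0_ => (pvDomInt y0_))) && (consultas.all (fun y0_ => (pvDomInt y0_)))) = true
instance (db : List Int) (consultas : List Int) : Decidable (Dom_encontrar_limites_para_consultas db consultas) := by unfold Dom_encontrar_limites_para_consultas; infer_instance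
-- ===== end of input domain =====

-- B replaces sort+dedup+bisect by a direct per-query scan of the raw db keeping the
-- running max of elements < q and running min of elements > q (objective: alternative).

-- ===== PORT A =====
-- per-query body of A's loop (bisect indices are always in range here, so getD is exact)
def pvLineaA (db_unica : List Int) (q : Int) : String :=
  let idx_superior := PySem.List.bisectRight db_unica q
  let limite_superior := if idx_superior < db_unica.length
    then PySem.Int.toStr (db_unica.getD idx_superior 0) else "X"
  let idx_inferior_candidato := PySem.List.bisectLeft db_unica q
  let limite_inferior := if 0 < idx_inferior_candidato
    then PySem.Int.toStr (db_unica.getD (idx_inferior_candidato - 1) 0) else "X"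
  limite_inferior ++ " " ++ limite_superior

def encontrar_limites_para_consultas (db : List Int) (consultas : List Int) : String :=
  let db_unica := PySem.List.sorted (PySem.Set.ofList db) (fun x => x)
  if db_unica = [] then
    PySem.Str.join "\n" (List.replicate consultas.length "X X")
  else
    PySem.Str.join "\n" (consultas.foldl (fun res q => res ++ [pvLineaA db_unica q]) [])

-- ===== PORT B =====
-- one step of B's inner scan: update (inf, sup) with x
def pvStep (q : Int) (p : Option Int × Option Int) (x : Int) : Option Int × Option Int :=
  let inf := if decide (x < q) && (match p.1 with | none => true | some m => decide (m < x))
    then some x else p.1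
  let sup := if decide (q < x) && (match p.2 with | none => true | some m => decide (x < m))
    then some x else p.2
  (inf, sup)

def pvLinea (db : List Int) (q : Int) : String :=
  let p := db.foldl (pvStep q) (none, none)
  (match p.1 with | none => "X" | some v => PySem.Int.toStr v) ++ " " ++
  (match p.2 with | none => "X" | some v => PySem.Int.toStr v)

def encontrar_limites_para_consultas_alt (db : List Int) (consultas : List Int) : String :=
  PySem.Str.join "\n" (consultas.foldl (fun acc q => acc ++ [pvLinea db q]) [])

-- ===== PRECONDITION & SPEC =====
def Spec_encontrar_limites_para_consultas (db : List Int) (consultas : List Int) (out : String) : Prop := out = encontrar_limites_para_consultas_alt db consultas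
instance (db : List Int) (consultas : List Int) (out : String) : Decidable (Spec_encontrar_limites_para_consultas db consultas out) := by unfold Spec_encontrar_limites_para_consultas; infer_instance

-- ===== CLAIM (what is proved, stated in full; the proofs are below) =====
def Claim_equal_encontrar_limites_para_consultas : Prop := ∀ (db : List Int) (consultas : List Int), Dom_encontrar_limites_para_consultas db consultas → Spec_encontrar_limites_para_consultas db consultas (encontrar_limites_para_consultas db consultas)

-- ===== LEMMAS AND PROOFS =====

-- "o is the strict predecessor of q in db" (greatest element < q, none if there is none)
def IsInfOf (db : List Int) (q : Int) (o : Option Int) : Prop :=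
  (∀ m, o = some m → m ∈ db ∧ m < q) ∧ (∀ x ∈ db, x < q → ∃ m, o = some m ∧ x ≤ m)

-- "o is the strict successor of q in db" (least element > q, none if there is none)
def IsSupOf (db : List Int) (q : Int) (o : Option Int) : Prop :=
  (∀ m, o = some m → m ∈ db ∧ q < m) ∧ (∀ x ∈ db, q < x → ∃ m, o = some m ∧ m ≤ x)

theorem isInf_unique (db : List Int) (q : Int) (o₁ o₂ : Option Int)
    (h₁ : IsInfOf db q o₁) (h₂ : IsInfOf db q o₂) : o₁ = o₂ := by
  obtain ⟨a₁, b₁⟩ := h₁; obtain ⟨a₂, b₂⟩ := h₂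
  cases o₁ with
  | none =>
    cases o₂ with
    | none => rfl
    | some m =>
      obtain ⟨hm, hlt⟩ := a₂ m rfl
      obtain ⟨m', hm', _⟩ := b₁ m hm hlt
      exact absurd hm' (by simp)
  | some m =>
    obtain ⟨hm, hlt⟩ := a₁ m rfl
    cases o₂ with
    | none =>
      obtain ⟨m', hm', _⟩ := b₂ m hm hlt
      exact absurd hm' (by simp)
    | some m₂ =>
      obtain ⟨hm₂, hlt₂⟩ := a₂ m₂ rfl
      obtain ⟨m', hm', hle⟩ := b₂ m hm hlt
      obtain ⟨m'', hm'', hle'⟩ := b₁ m₂ hm₂ hlt₂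
      simp only [Option.some.injEq] at hm' hm''
      subst hm'; subst hm''
      exact congrArg some (le_antisymm hle hle')

theorem isSup_unique (db : List Int) (q : Int) (o₁ o₂ : Option Int)
    (h₁ : IsSupOf db q o₁) (h₂ : IsSupOf db q o₂) : o₁ = o₂ := by
  obtain ⟨a₁, b₁⟩ := h₁; obtain ⟨a₂, b₂⟩ := h₂
  cases o₁ with
  | none =>
    cases o₂ with
    | none => rfl
    | some m =>
      obtain ⟨hm, hlt⟩ := a₂ m rfl
      obtain ⟨m', hm', _⟩ := b₁ m hm hlt
      exact absurd hm' (by simp)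
  | some m =>
    obtain ⟨hm, hlt⟩ := a₁ m rfl
    cases o₂ with
    | none =>
      obtain ⟨m', hm', _⟩ := b₂ m hm hlt
      exact absurd hm' (by simp)
    | some m₂ =>
      obtain ⟨hm₂, hlt₂⟩ := a₂ m₂ rfl
      obtain ⟨m', hm', hle⟩ := b₂ m hm hlt
      obtain ⟨m'', hm'', hle'⟩ := b₁ m₂ hm₂ hlt₂
      simp only [Option.some.injEq] at hm' hm''
      subst hm'; subst hm''
      exact congrArg some (le_antisymm hle' hle)

-- the two components of B's scan, separated
def infStep (q : Int) (a : Option Int) (x : Int) : Option Int :=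
  if decide (x < q) && (match a with | none => true | some m => decide (m < x)) then some x else a

def supStep (q : Int) (a : Option Int) (x : Int) : Option Int :=
  if decide (q < x) && (match a with | none => true | some m => decide (x < m)) then some x else a

theorem foldl_pvStep (q : Int) (db : List Int) (p : Option Int × Option Int) :
    db.foldl (pvStep q) p = (db.foldl (infStep q) p.1, db.foldl (supStep q) p.2) := by
  induction db generalizing p with
  | nil => rfl
  | cons x t ih => simp only [List.foldl_cons]; exact ih _

theorem infFold_spec (q : Int) (db : List Int) : ∀ (a : Option Int),
    (∀ m, a = some m → m < q) →
    (∀ m, db.foldl (infStep q) a = some m → ((m ∈ db ∧ m < q) ∨ a = some m))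
    ∧ (∀ x ∈ db, x < q → ∃ m, db.foldl (infStep q) a = some m ∧ x ≤ m)
    ∧ (∀ m₀, a = some m₀ → ∃ m, db.foldl (infStep q) a = some m ∧ m₀ ≤ m) := by
  induction db with
  | nil =>
    intro a ha
    refine ⟨fun m hm => Or.inr hm, by simp, fun m₀ h => ⟨m₀, h, le_refl _⟩⟩
  | cons x t ih =>
    intro a ha
    simp only [List.foldl_cons]
    have key : (infStep q a x = some x ∧ x < q ∧ (∀ m₀, a = some m₀ → m₀ ≤ x))
             ∨ (infStep q a x = a ∧ (x < q → ∃ m₀, a = some m₀ ∧ x ≤ m₀)) := by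
      cases a with
      | none =>
        by_cases hq : x < q
        · exact Or.inl ⟨by simp [infStep, hq], hq, by simp⟩
        · exact Or.inr ⟨by simp [infStep, hq], fun h => absurd h hq⟩
      | some m₀ =>
        by_cases hq : x < q
        · by_cases hm : m₀ < x
          · refine Or.inl ⟨by simp [infStep, hq, hm], hq, ?_⟩
            intro m h
            cases h
            exact le_of_lt hm
          · exact Or.inr ⟨by simp [infStep, hq, hm], fun _ => ⟨m₀, rfl, le_of_not_gt hm⟩⟩
        · exact Or.inr ⟨by simp [infStep, hq], fun h => absurd h hq⟩
    rcases key with ⟨ha', hxq, hrepl⟩ | ⟨ha', hkeep⟩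
    · rw [ha']
      have ih' := ih (some x) (by intro m hm; cases hm; exact hxq)
      refine ⟨?_, ?_, ?_⟩
      · intro m hm
        rcases ih'.1 m hm with ⟨hmem, hlt⟩ | heq
        · exact Or.inl ⟨List.mem_cons_of_mem _ hmem, hlt⟩
        · cases heq; exact Or.inl ⟨List.mem_cons_self, hxq⟩
      · intro y hy hylt
        rcases List.mem_cons.mp hy with rfl | hyt
        · exact ih'.2.2 y rfl
        · exact ih'.2.1 y hyt hylt
      · intro m₀ hm₀
        obtain ⟨m, hm, hle⟩ := ih'.2.2 x rfl
        exact ⟨m, hm, le_trans (hrepl m₀ hm₀) hle⟩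
    · rw [ha']
      have ih' := ih a ha
      refine ⟨?_, ?_, ih'.2.2⟩
      · intro m hm
        rcases ih'.1 m hm with ⟨hmem, hlt⟩ | heq
        · exact Or.inl ⟨List.mem_cons_of_mem _ hmem, hlt⟩
        · exact Or.inr heq
      · intro y hy hylt
        rcases List.mem_cons.mp hy with rfl | hyt
        · obtain ⟨m₀, ha0, hxm⟩ := hkeep hylt
          obtain ⟨m, hm, hle⟩ := ih'.2.2 m₀ ha0
          exact ⟨m, hm, le_trans hxm hle⟩
        · exact ih'.2.1 y hyt hylt

theorem supFold_spec (q : Int) (db : List Int) : ∀ (a : Option Int),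
    (∀ m, a = some m → q < m) →
    (∀ m, db.foldl (supStep q) a = some m → ((m ∈ db ∧ q < m) ∨ a = some m))
    ∧ (∀ x ∈ db, q < x → ∃ m, db.foldl (supStep q) a = some m ∧ m ≤ x)
    ∧ (∀ m₀, a = some m₀ → ∃ m, db.foldl (supStep q) a = some m ∧ m ≤ m₀) := by
  induction db with
  | nil =>
    intro a ha
    refine ⟨fun m hm => Or.inr hm, by simp, fun m₀ h => ⟨m₀, h, le_refl _⟩⟩
  | cons x t ih =>
    intro a ha
    simp only [List.foldl_cons]
    have key : (supStep q a x = some x ∧ q < x ∧ (∀ m₀, a = some m₀ → x ≤ m₀))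
             ∨ (supStep q a x = a ∧ (q < x → ∃ m₀, a = some m₀ ∧ m₀ ≤ x)) := by
      cases a with
      | none =>
        by_cases hq : q < x
        · exact Or.inl ⟨by simp [supStep, hq], hq, by simp⟩
        · exact Or.inr ⟨by simp [supStep, hq], fun h => absurd h hq⟩
      | some m₀ =>
        by_cases hq : q < x
        · by_cases hm : x < m₀
          · refine Or.inl ⟨by simp [supStep, hq, hm], hq, ?_⟩
            intro m h
            cases h
            exact le_of_lt hm
          · exact Or.inr ⟨by simp [supStep, hq, hm], fun _ => ⟨m₀, rfl, le_of_not_gt hm⟩⟩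
        · exact Or.inr ⟨by simp [supStep, hq], fun h => absurd h hq⟩
    rcases key with ⟨ha', hxq, hrepl⟩ | ⟨ha', hkeep⟩
    · rw [ha']
      have ih' := ih (some x) (by intro m hm; cases hm; exact hxq)
      refine ⟨?_, ?_, ?_⟩
      · intro m hm
        rcases ih'.1 m hm with ⟨hmem, hlt⟩ | heq
        · exact Or.inl ⟨List.mem_cons_of_mem _ hmem, hlt⟩
        · cases heq; exact Or.inl ⟨List.mem_cons_self, hxq⟩
      · intro y hy hylt
        rcases List.mem_cons.mp hy with rfl | hyt
        · exact ih'.2.2 y rfl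
        · exact ih'.2.1 y hyt hylt
      · intro m₀ hm₀
        obtain ⟨m, hm, hle⟩ := ih'.2.2 x rfl
        exact ⟨m, hm, le_trans hle (hrepl m₀ hm₀)⟩
    · rw [ha']
      have ih' := ih a ha
      refine ⟨?_, ?_, ih'.2.2⟩
      · intro m hm
        rcases ih'.1 m hm with ⟨hmem, hlt⟩ | heq
        · exact Or.inl ⟨List.mem_cons_of_mem _ hmem, hlt⟩
        · exact Or.inr heq
      · intro y hy hylt
        rcases List.mem_cons.mp hy with rfl | hyt
        · obtain ⟨m₀, ha0, hxm⟩ := hkeep hylt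
          obtain ⟨m, hm, hle⟩ := ih'.2.2 m₀ ha0
          exact ⟨m, hm, le_trans hle hxm⟩
        · exact ih'.2.1 y hyt hylt

theorem infFold_isInf (db : List Int) (q : Int) :
    IsInfOf db q (db.foldl (infStep q) none) := by
  have h := infFold_spec q db none (by simp)
  refine ⟨?_, h.2.1⟩
  intro m hm
  rcases h.1 m hm with hgood | hbad
  · exact hgood
  · exact absurd hbad (by simp)

theorem supFold_isSup (db : List Int) (q : Int) :
    IsSupOf db q (db.foldl (supStep q) none) := by
  have h := supFold_spec q db none (by simp)
  refine ⟨?_, h.2.1⟩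
  intro m hm
  rcases h.1 m hm with hgood | hbad
  · exact hgood
  · exact absurd hbad (by simp)

-- A-side option-level values
def pvInfA (L : List Int) (q : Int) : Option Int :=
  if 0 < PySem.List.bisectLeft L q then some (L.getD (PySem.List.bisectLeft L q - 1) 0) else none

def pvSupA (L : List Int) (q : Int) : Option Int :=
  if PySem.List.bisectRight L q < L.length then some (L.getD (PySem.List.bisectRight L q) 0) else none

theorem sorted_mem_db (db : List Int) (x : Int) :
    x ∈ PySem.List.sorted (PySem.Set.ofList db) (fun x => x) ↔ x ∈ db := by
  rw [PySem.List.mem_sorted, PySem.Set.mem_ofList]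

theorem sorted_pairwise_le (db : List Int) :
    List.Pairwise (fun a b => a ≤ b) (PySem.List.sorted (PySem.Set.ofList db) (fun x => x)) :=
  (PySem.List.sorted_ofList_pairwise_lt db).imp le_of_lt

theorem getElem_mono_of_pairwise_le {L : List Int}
    (hp : List.Pairwise (fun a b => a ≤ b) L) {i j : Nat} (hij : i ≤ j) (hj : j < L.length) :
    L[i]'(lt_of_le_of_lt hij hj) ≤ L[j] := by
  rcases Nat.lt_or_ge i j with h | h
  · exact (List.pairwise_iff_getElem.mp hp) i j _ hj h
  · have : i = j := le_antisymm hij h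
    subst this; exact le_refl _

theorem pvInfA_isInf_gen (L db : List Int) (q : Int)
    (hp : List.Pairwise (fun a b => a ≤ b) L) (hmem : ∀ x : Int, x ∈ L ↔ x ∈ db) :
    IsInfOf db q (pvInfA L q) := by
  obtain ⟨hlen, hbelow, habove⟩ := PySem.List.bisectLeft_spec L q hp
  unfold pvInfA
  by_cases h0 : 0 < PySem.List.bisectLeft L q
  · simp only [h0, if_pos]
    have hk1 : PySem.List.bisectLeft L q - 1 < L.length := by omega
    have hget : L.getD (PySem.List.bisectLeft L q - 1) 0 = L[PySem.List.bisectLeft L q - 1] :=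
      List.getD_eq_getElem L 0 hk1
    constructor
    · intro m hm
      simp only [Option.some.injEq] at hm
      subst hm
      rw [hget]
      exact ⟨(hmem _).mp (List.getElem_mem hk1), hbelow _ hk1 (by omega)⟩
    · intro x hx hxq
      obtain ⟨j, hj, hxj⟩ := List.mem_iff_getElem.mp ((hmem x).mpr hx)
      have hjk : j < PySem.List.bisectLeft L q := by
        by_contra hge
        have := habove j hj (by omega)
        omega
      refine ⟨_, rfl, ?_⟩
      rw [hget, ← hxj]
      exact getElem_mono_of_pairwise_le hp (by omega) hk1
  · simp only [h0, if_false]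
    refine ⟨by simp, ?_⟩
    intro x hx hxq
    obtain ⟨j, hj, hxj⟩ := List.mem_iff_getElem.mp ((hmem x).mpr hx)
    have := habove j hj (by omega)
    omega

theorem pvSupA_isSup_gen (L db : List Int) (q : Int)
    (hp : List.Pairwise (fun a b => a ≤ b) L) (hmem : ∀ x : Int, x ∈ L ↔ x ∈ db) :
    IsSupOf db q (pvSupA L q) := by
  obtain ⟨hlen, hbelow, habove⟩ := PySem.List.bisectRight_spec L q hp
  unfold pvSupA
  by_cases h0 : PySem.List.bisectRight L q < L.length
  · simp only [h0, if_pos]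
    have hget : L.getD (PySem.List.bisectRight L q) 0 = L[PySem.List.bisectRight L q] :=
      List.getD_eq_getElem L 0 h0
    constructor
    · intro m hm
      simp only [Option.some.injEq] at hm
      subst hm
      rw [hget]
      exact ⟨(hmem _).mp (List.getElem_mem h0), habove _ h0 (le_refl _)⟩
    · intro x hx hxq
      obtain ⟨j, hj, hxj⟩ := List.mem_iff_getElem.mp ((hmem x).mpr hx)
      have hjk : PySem.List.bisectRight L q ≤ j := by
        by_contra hlt
        have := hbelow j hj (by omega)
        omega
      refine ⟨_, rfl, ?_⟩
      rw [hget, ← hxj]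
      exact getElem_mono_of_pairwise_le hp hjk hj
  · simp only [h0, if_false]
    refine ⟨by simp, ?_⟩
    intro x hx hxq
    obtain ⟨j, hj, hxj⟩ := List.mem_iff_getElem.mp ((hmem x).mpr hx)
    have := hbelow j hj (by omega)
    omega

theorem pvInfA_isInf (db : List Int) (q : Int) :
    IsInfOf db q (pvInfA (PySem.List.sorted (PySem.Set.ofList db) (fun x => x)) q) :=
  pvInfA_isInf_gen _ db q (sorted_pairwise_le db) (sorted_mem_db db)

theorem pvSupA_isSup (db : List Int) (q : Int) :
    IsSupOf db q (pvSupA (PySem.List.sorted (PySem.Set.ofList db) (fun x => x)) q) :=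
  pvSupA_isSup_gen _ db q (sorted_pairwise_le db) (sorted_mem_db db)

-- per-query: A's formatted line equals B's formatted line
theorem linea_eq (db : List Int) (q : Int) :
    pvLineaA (PySem.List.sorted (PySem.Set.ofList db) (fun x => x)) q = pvLinea db q := by
  have hinf : pvInfA (PySem.List.sorted (PySem.Set.ofList db) (fun x => x)) q
      = db.foldl (infStep q) none :=
    isInf_unique db q _ _ (pvInfA_isInf db q) (infFold_isInf db q)
  have hsup : pvSupA (PySem.List.sorted (PySem.Set.ofList db) (fun x => x)) q
      = db.foldl (supStep q) none :=
    isSup_unique db q _ _ (pvSupA_isSup db q) (supFold_isSup db q)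
  unfold pvLinea
  rw [foldl_pvStep]
  unfold pvLineaA
  set L := PySem.List.sorted (PySem.Set.ofList db) (fun x => x) with hLdef
  have einf : (if 0 < PySem.List.bisectLeft L q
      then PySem.Int.toStr (L.getD (PySem.List.bisectLeft L q - 1) 0) else "X")
      = (match db.foldl (infStep q) none with | none => "X" | some v => PySem.Int.toStr v) := by
    rw [← hinf]
    unfold pvInfA
    by_cases h0 : 0 < PySem.List.bisectLeft L q <;> simp [h0]
  have esup : (if PySem.List.bisectRight L q < L.length
      then PySem.Int.toStr (L.getD (PySem.List.bisectRight L q) 0) else "X")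
      = (match db.foldl (supStep q) none with | none => "X" | some v => PySem.Int.toStr v) := by
    rw [← hsup]
    unfold pvSupA
    by_cases h0 : PySem.List.bisectRight L q < L.length <;> simp [h0]
  simp only []
  rw [einf, esup]

theorem pvLinea_nil (q : Int) : pvLinea [] q = "X X" := rfl

-- ===== VERDICT (by name: the statement is the Claim_ definition above) =====
theorem encontrar_limites_para_consultas_spec : Claim_equal_encontrar_limites_para_consultas := by
  intro db consultas _
  unfold Spec_encontrar_limites_para_consultas
  unfold encontrar_limites_para_consultas encontrar_limites_para_consultas_alt
  simp only []
  by_cases hL : PySem.List.sorted (PySem.Set.ofList db) (fun x => x) = []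
  · have hdb : db = [] := by
      have hof : PySem.Set.ofList db = [] := (PySem.List.sorted_eq_nil_iff _ _ _).mp hL
      cases db with
      | nil => rfl
      | cons x t =>
        have : x ∈ PySem.Set.ofList (x :: t) := (PySem.Set.mem_ofList _ _).mpr List.mem_cons_self
        rw [hof] at this
        exact absurd this (List.not_mem_nil)
    subst hdb
    rw [if_pos hL]
    congr 1
    rw [PySem.List.foldl_append_singleton_eq_map]
    simp only [List.nil_append]
    symm
    rw [List.eq_replicate_iff]
    refine ⟨by simp, ?_⟩
    intro s hs
    obtain ⟨q, _, hq⟩ := List.mem_map.mp hs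
    rw [← hq, pvLinea_nil]
  · rw [if_neg hL]
    congr 1
    rw [PySem.List.foldl_append_singleton_eq_map, PySem.List.foldl_append_singleton_eq_map]
    simp only [List.nil_append]
    exact List.map_congr_left (fun q _ => linea_eq db q)
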